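-- pv_equiv track=rewrite | github.com/thiagolealg/System_recommendation | user_interactions.py | generate_song_cooccurrences
-- ===== SOURCE A (Python) =====
-- from collections import defaultdict
--
-- def generate_song_cooccurrences(interactions):
--     """
--     Gera uma matriz de co-ocorrências entre músicas baseada nas interações dos usuários.
--
--     Args:
--         interactions: Dicionário {user_id: [lista de músicas curtidas]}
--
--     Returns:
--         Dicionário {song: {related_song: count, ...}}
--     """
--     cooccurrence = defaultdict(lambda: defaultdict(int))
--
--     # Para cada usuário e suas músicas curtidas
--     for user, songs in interactions.items():
--         # Para cada par de músicas curtidas pelo mesmo usuário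
--         for song1 in songs:
--             for song2 in songs:
--                 if song1 != song2:
--                     cooccurrence[song1][song2] += 1
--
--     return cooccurrence
-- ===== SOURCE B (Python) =====
-- from collections import defaultdict, Counter
--
-- def generate_song_cooccurrences(interactions):
--     # Stage 1: one flat Counter keyed by ordered pairs, fed with count products per user.
--     pair_counts = Counter()
--     for songs in interactions.values():
--         counts = Counter(songs)
--         for s1, c1 in counts.items():
--             for s2, c2 in counts.items():
--                 if s1 != s2:
--                     pair_counts[(s1, s2)] += c1 * c2
--     # Stage 2: regroup the flat pair counts into the nested defaultdict shape.
--     cooccurrence = defaultdict(lambda: defaultdict(int))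
--     for (s1, s2), c in pair_counts.items():
--         cooccurrence[s1][s2] = c
--     return cooccurrence
-- ===== Notes on version B (the rewrite author's own statement) =====
-- stated objective: alternative
-- what changed: Per user B builds a Counter and adds c1*c2 for each ordered pair of distinct songs into ONE flat Counter keyed by (s1, s2); a final pass regroups the flat pair counts into the nested defaultdict, replacing A's element-by-element double loop that updates the nested dict in place.
import Mathlib
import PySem

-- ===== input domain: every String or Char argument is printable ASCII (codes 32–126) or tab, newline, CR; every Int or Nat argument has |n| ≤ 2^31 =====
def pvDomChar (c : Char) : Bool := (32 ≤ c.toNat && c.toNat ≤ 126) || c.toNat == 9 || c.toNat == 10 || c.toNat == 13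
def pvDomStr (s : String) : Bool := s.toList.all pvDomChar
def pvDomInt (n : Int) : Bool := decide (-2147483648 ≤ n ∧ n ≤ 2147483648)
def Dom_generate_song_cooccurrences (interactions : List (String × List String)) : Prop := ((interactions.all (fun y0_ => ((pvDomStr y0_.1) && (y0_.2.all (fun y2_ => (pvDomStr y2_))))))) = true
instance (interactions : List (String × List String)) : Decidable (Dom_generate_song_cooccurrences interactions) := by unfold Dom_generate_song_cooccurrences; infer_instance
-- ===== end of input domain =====

-- B replaces A's per-user double loop over song occurrences with a Counter per user feeding one
-- flat Counter keyed by ordered song pairs (adding count products), regrouped into the nested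
-- dict in a final pass (objective: alternative algorithm).

-- ===== PORT A =====
-- cooccurrence[song1][song2] += 1 on the nested defaultdict
def gscBump (coo : PySem.Dict String (PySem.Dict String Int)) (s1 s2 : String) (k : Int) :
    PySem.Dict String (PySem.Dict String Int) :=
  let inner := coo.getD s1 PySem.Dict.empty
  coo.insert s1 (inner.insert s2 (inner.getD s2 0 + k))

def generate_song_cooccurrences (interactions : List (String × List String)) :
    List (String × List (String × Int)) :=
  let coo := interactions.foldl (fun coo p =>
    p.2.foldl (fun coo s1 =>
      p.2.foldl (fun coo s2 =>
        if s1 ≠ s2 then gscBump coo s1 s2 1 else coo) coo) coo) PySem.Dict.empty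
  coo.items.map (fun q => (q.1, q.2.items))

-- ===== PORT B =====
def generate_song_cooccurrences_alt (interactions : List (String × List String)) :
    List (String × List (String × Int)) :=
  -- stage 1: pair_counts[(s1, s2)] += c1 * c2 over distinct songs of each user's Counter
  let pair_counts := interactions.foldl (fun pc p =>
    let counts := PySem.Dict.counter p.2
    counts.items.foldl (fun pc q1 =>
      counts.items.foldl (fun pc q2 =>
        if q1.1 ≠ q2.1 then
          pc.insert (q1.1, q2.1) (pc.getD (q1.1, q2.1) 0 + q1.2 * q2.2)
        else pc) pc) pc)
    (PySem.Dict.empty : PySem.Dict (String × String) Int)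
  -- stage 2: regroup the flat pair counts into the nested shape
  let coo := pair_counts.items.foldl (fun coo e =>
    coo.insert e.1.1 ((coo.getD e.1.1 PySem.Dict.empty).insert e.1.2 e.2))
    (PySem.Dict.empty : PySem.Dict String (PySem.Dict String Int))
  coo.items.map (fun q => (q.1, q.2.items))

-- ===== PRECONDITION & SPEC =====
def Spec_generate_song_cooccurrences (interactions : List (String × List String)) (out : List (String × List (String × Int))) : Prop := out = generate_song_cooccurrences_alt interactions
instance (interactions : List (String × List String)) (out : List (String × List (String × Int))) : Decidable (Spec_generate_song_cooccurrences interactions out) := by unfold Spec_generate_song_cooccurrences; infer_instance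

-- ===== CLAIM (what is proved, stated in full; the proofs are below) =====
def Claim_equal_generate_song_cooccurrences : Prop := ∀ (interactions : List (String × List String)), Dom_generate_song_cooccurrences interactions → Spec_generate_song_cooccurrences interactions (generate_song_cooccurrences interactions)

-- ===== LEMMAS AND PROOFS =====

-- abstract replay of a stream of weighted pair-updates on the NESTED dict
def applyInner (d : PySem.Dict String Int) (ws : List (String × Int)) : PySem.Dict String Int :=
  ws.foldl (fun d w => d.insert w.1 (d.getD w.1 0 + w.2)) d

def applyB (coo : PySem.Dict String (PySem.Dict String Int)) (qs : List (String × String × Int)) :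
    PySem.Dict String (PySem.Dict String Int) :=
  qs.foldl (fun coo t => gscBump coo t.1 t.2.1 t.2.2) coo

-- the same stream replayed on B's FLAT pair dict
def flatApply (F : PySem.Dict (String × String) Int) (qs : List (String × String × Int)) :
    PySem.Dict (String × String) Int :=
  qs.foldl (fun F t => F.insert (t.1, t.2.1) (F.getD (t.1, t.2.1) 0 + t.2.2)) F

-- B's stage-2 assignment coo[a][b] = v, and the regroup fold over a flat items list
def rgAssign (coo : PySem.Dict String (PySem.Dict String Int)) (a b : String) (v : Int) :
    PySem.Dict String (PySem.Dict String Int) :=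
  coo.insert a ((coo.getD a PySem.Dict.empty).insert b v)

def regroupL (ts : List ((String × String) × Int)) : PySem.Dict String (PySem.Dict String Int) :=
  ts.foldl (fun coo e => rgAssign coo e.1.1 e.1.2 e.2) PySem.Dict.empty

def sumFor (ws : List (String × Int)) (b : String) : Int :=
  ((ws.filter (fun w => decide (w.1 = b))).map (·.2)).sum

def projA (qs : List (String × String × Int)) (a : String) : List (String × Int) :=
  (qs.filter (fun t => decide (t.1 = a))).map (·.2)

-- the two per-user update streams
def qsA (songs : List String) : List (String × String × Int) :=
  songs.flatMap (fun s1 => (songs.filter (fun s2 => decide (s1 ≠ s2))).map (fun s2 => (s1, s2, (1 : Int))))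

def qsB (songs : List String) : List (String × String × Int) :=
  (PySem.Set.ofList songs).flatMap (fun a =>
    ((PySem.Set.ofList songs).filter (fun b => decide (a ≠ b))).map
      (fun b => (a, b, (songs.count a : Int) * (songs.count b : Int))))

def GoodCoo (coo : PySem.Dict String (PySem.Dict String Int)) : Prop :=
  coo.keys.Nodup ∧ ∀ a, (coo.getD a PySem.Dict.empty).keys.Nodup

theorem applyB_append (coo : PySem.Dict String (PySem.Dict String Int)) (qs qs' : List (String × String × Int)) :
    applyB coo (qs ++ qs') = applyB (applyB coo qs) qs' := by
  simp [applyB, List.foldl_append]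

theorem innerA_eq (s1 : String) (l : List String) (coo : PySem.Dict String (PySem.Dict String Int)) :
    l.foldl (fun coo s2 => if s1 ≠ s2 then gscBump coo s1 s2 1 else coo) coo
      = applyB coo ((l.filter (fun s2 => decide (s1 ≠ s2))).map (fun s2 => (s1, s2, (1 : Int)))) := by
  induction l generalizing coo with
  | nil => rfl
  | cons x l ih =>
    by_cases hx : s1 ≠ x
    · rw [List.foldl_cons, if_pos hx, ih]
      simp [hx, applyB]
    · rw [List.foldl_cons, if_neg hx, ih]
      simp [hx]


theorem outerA_eq (songs : List String) (coo : PySem.Dict String (PySem.Dict String Int)) :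
    songs.foldl (fun coo s1 =>
        songs.foldl (fun coo s2 => if s1 ≠ s2 then gscBump coo s1 s2 1 else coo) coo) coo
      = applyB coo (qsA songs) := by
  suffices h : ∀ (l : List String) (coo : PySem.Dict String (PySem.Dict String Int)),
      l.foldl (fun coo s1 =>
        songs.foldl (fun coo s2 => if s1 ≠ s2 then gscBump coo s1 s2 1 else coo) coo) coo
      = applyB coo (l.flatMap (fun s1 =>
          (songs.filter (fun s2 => decide (s1 ≠ s2))).map (fun s2 => (s1, s2, (1 : Int))))) by
    exact h songs coo
  intro l
  induction l with
  | nil => intro coo; rfl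
  | cons x l ih =>
    intro coo
    rw [List.foldl_cons, List.flatMap_cons, applyB_append, ← innerA_eq, ih]


theorem flatApply_append (F : PySem.Dict (String × String) Int) (qs qs' : List (String × String × Int)) :
    flatApply F (qs ++ qs') = flatApply (flatApply F qs) qs' := by
  simp [flatApply, List.foldl_append]

theorem innerB_eq (q1 : String × Int) (l : List (String × Int)) (F : PySem.Dict (String × String) Int) :
    l.foldl (fun F q2 => if q1.1 ≠ q2.1 then
        F.insert (q1.1, q2.1) (F.getD (q1.1, q2.1) 0 + q1.2 * q2.2) else F) F
      = flatApply F ((l.filter (fun q2 => decide (q1.1 ≠ q2.1))).map (fun q2 => (q1.1, q2.1, q1.2 * q2.2))) := by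
  induction l generalizing F with
  | nil => rfl
  | cons x l ih =>
    by_cases hx : q1.1 ≠ x.1
    · rw [List.foldl_cons, if_pos hx, ih]
      simp [hx, flatApply]
    · rw [List.foldl_cons, if_neg hx, ih]
      simp [hx]


theorem outerB_eq (songs : List String) (F : PySem.Dict (String × String) Int) :
    (PySem.Dict.counter songs).items.foldl (fun F q1 =>
        (PySem.Dict.counter songs).items.foldl (fun F q2 =>
          if q1.1 ≠ q2.1 then
            F.insert (q1.1, q2.1) (F.getD (q1.1, q2.1) 0 + q1.2 * q2.2) else F) F) F
      = flatApply F (qsB songs) := by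
  suffices h : ∀ (l : List (String × Int)) (F : PySem.Dict (String × String) Int),
      l.foldl (fun F q1 =>
        (PySem.Dict.counter songs).items.foldl (fun F q2 =>
          if q1.1 ≠ q2.1 then
            F.insert (q1.1, q2.1) (F.getD (q1.1, q2.1) 0 + q1.2 * q2.2) else F) F) F
      = flatApply F (l.flatMap (fun q1 =>
          ((PySem.Dict.counter songs).items.filter (fun q2 => decide (q1.1 ≠ q2.1))).map
            (fun q2 => (q1.1, q2.1, q1.2 * q2.2)))) by
    rw [h]
    congr 1
    unfold qsB
    rw [PySem.Dict.items_counter]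
    rw [List.flatMap_map]
    refine List.flatMap_congr ?_
    intro a _
    simp [List.filter_map, List.map_map, Function.comp_def]
  intro l
  induction l with
  | nil => intro F; rfl
  | cons x l ih =>
    intro F
    rw [List.foldl_cons, List.flatMap_cons, flatApply_append, ← innerB_eq, ih]


theorem applyInner_getD (ws : List (String × Int)) (d : PySem.Dict String Int) (b : String) :
    (applyInner d ws).getD b 0 = d.getD b 0 + sumFor ws b := by
  induction ws generalizing d with
  | nil => simp [applyInner, sumFor]
  | cons w ws ih =>
    show (applyInner (d.insert w.1 (d.getD w.1 0 + w.2)) ws).getD b 0 = _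
    rw [ih, PySem.Dict.getD_insert]
    by_cases hb : b = w.1
    · simp only [hb, sumFor, List.filter_cons]
      simp
      ring
    · simp only [if_neg hb, sumFor, List.filter_cons]
      have : (decide (w.1 = b)) = false := by simp [Ne.symm hb]
      simp [this]


theorem applyInner_keys (ws : List (String × Int)) (d : PySem.Dict String Int) :
    (applyInner d ws).keys = PySem.Set.update d.keys (ws.map (·.1)) := by
  exact PySem.Dict.keys_foldl_insert_key ws (fun w => w.1) (fun d w => d.getD w.1 0 + w.2) d


theorem applyInner_nodup (ws : List (String × Int)) (d : PySem.Dict String Int) (h : d.keys.Nodup) :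
    (applyInner d ws).keys.Nodup := by
  exact PySem.Dict.nodup_keys_foldl_insert_key ws (fun w => w.1) (fun d w => d.getD w.1 0 + w.2) d h


theorem applyB_getD (qs : List (String × String × Int)) (coo : PySem.Dict String (PySem.Dict String Int)) (a : String) :
    (applyB coo qs).getD a PySem.Dict.empty = applyInner (coo.getD a PySem.Dict.empty) (projA qs a) := by
  induction qs generalizing coo with
  | nil => simp [applyB, applyInner, projA]
  | cons t qs ih =>
    show (applyB (gscBump coo t.1 t.2.1 t.2.2) qs).getD a PySem.Dict.empty = _
    rw [ih]
    simp only [gscBump, projA]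
    by_cases ha : t.1 = a
    · subst ha
      rw [PySem.Dict.getD_insert_self]
      simp only [List.filter_cons, decide_eq_true]
      rfl
    · rw [PySem.Dict.getD_insert_of_ne _ _ _ (Ne.symm ha)]
      have hd : (decide (t.1 = a)) = false := by simp [ha]
      simp [hd]


theorem applyB_keys (qs : List (String × String × Int)) (coo : PySem.Dict String (PySem.Dict String Int)) :
    (applyB coo qs).keys = PySem.Set.update coo.keys (qs.map (·.1)) := by
  simp only [applyB, gscBump]
  exact PySem.Dict.keys_foldl_insert_key qs (fun t => t.1)
    (fun coo t => (coo.getD t.1 PySem.Dict.empty).insert t.2.1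
      ((coo.getD t.1 PySem.Dict.empty).getD t.2.1 0 + t.2.2)) coo


theorem applyB_good (qs : List (String × String × Int)) (coo : PySem.Dict String (PySem.Dict String Int))
    (h : GoodCoo coo) : GoodCoo (applyB coo qs) := by
  obtain ⟨h1, h2⟩ := h
  constructor
  · rw [applyB_keys]
    exact PySem.Set.nodup_update _ _ h1
  · intro a
    rw [applyB_getD]
    exact applyInner_nodup _ _ (h2 a)


theorem applyInner_ext (d : PySem.Dict String Int) (hnd : d.keys.Nodup) (ws ws' : List (String × Int))
    (hk : PySem.Set.ofList (ws.map (·.1)) = PySem.Set.ofList (ws'.map (·.1)))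
    (hs : ∀ b, sumFor ws b = sumFor ws' b) :
    applyInner d ws = applyInner d ws' := by
  apply PySem.Dict.ext
  have hkeys : (applyInner d ws).keys = (applyInner d ws').keys := by
    rw [applyInner_keys, applyInner_keys, PySem.Set.update_eq_append_filter,
        PySem.Set.update_eq_append_filter, hk]
  rw [PySem.Dict.items_eq_map_keys _ (applyInner_nodup ws d hnd) 0,
      PySem.Dict.items_eq_map_keys _ (applyInner_nodup ws' d hnd) 0, hkeys]
  apply List.map_congr_left
  intro k _
  simp [applyInner_getD, hs]


theorem applyB_ext (coo : PySem.Dict String (PySem.Dict String Int)) (h : GoodCoo coo)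
    (qs qs' : List (String × String × Int))
    (hk : PySem.Set.ofList (qs.map (·.1)) = PySem.Set.ofList (qs'.map (·.1)))
    (hp : ∀ a, applyInner (coo.getD a PySem.Dict.empty) (projA qs a)
             = applyInner (coo.getD a PySem.Dict.empty) (projA qs' a)) :
    applyB coo qs = applyB coo qs' := by
  apply PySem.Dict.ext
  have hkeys : (applyB coo qs).keys = (applyB coo qs').keys := by
    rw [applyB_keys, applyB_keys, PySem.Set.update_eq_append_filter,
        PySem.Set.update_eq_append_filter, hk]
  rw [PySem.Dict.items_eq_map_keys _ (applyB_good qs coo h).1 PySem.Dict.empty,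
      PySem.Dict.items_eq_map_keys _ (applyB_good qs' coo h).1 PySem.Dict.empty, hkeys]
  apply List.map_congr_left
  intro k _
  simp [applyB_getD, hp]


-- ===== combinatorial facts about the two streams =====

theorem set_abs (m : List String) (s : PySem.Set String) (h : ∀ x ∈ m, x ∈ s) :
    PySem.Set.update s m = s := by
  induction m generalizing s with
  | nil => rfl
  | cons x m ih =>
    rw [PySem.Set.update_cons, PySem.Set.add_of_mem (h x (by simp))]
    exact ih s (fun x hx => h x (List.mem_cons_of_mem _ hx))


theorem set_const (a : String) (m : List String) (hm : ∀ x ∈ m, x = a) (hne : m ≠ []) (s : PySem.Set String) :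
    PySem.Set.update s m = PySem.Set.add s a := by
  revert hne hm
  induction m generalizing s with
  | nil => intro hm hne; exact absurd rfl hne
  | cons y m ih =>
    intro hm _
    have hy : y = a := hm y (by simp)
    subst hy
    rcases eq_or_ne m [] with h0 | h0
    · subst h0; rw [PySem.Set.update_cons]; rfl
    · rw [PySem.Set.update_cons, ih (PySem.Set.add s y) (fun x hx => hm x (List.mem_cons_of_mem _ hx)) h0,
         PySem.Set.add_of_mem ((PySem.Set.mem_add _ _ _).mpr (Or.inr rfl))]


theorem set_nel (l : List String) (f : String → List String)
    (h : ∀ a ∈ l, f a ≠ [] ∧ ∀ x ∈ f a, x = a) (s : PySem.Set String) :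
    PySem.Set.update s (l.flatMap f) = PySem.Set.update s l := by
  revert h
  induction l generalizing s with
  | nil => intro _; rfl
  | cons a l ih =>
    intro h
    rw [List.flatMap_cons, PySem.Set.update_append, PySem.Set.update_cons,
        set_const a (f a) (h a (by simp)).2 (h a (by simp)).1 s]
    exact ih _ (fun x hx => h x (List.mem_cons_of_mem _ hx))


theorem set_rep (m : List String) {α : Type} (R : List α) (hne : R ≠ []) (s : PySem.Set String) :
    PySem.Set.update s (R.flatMap (fun _ => m)) = PySem.Set.update s m := by
  revert hne
  induction R generalizing s with
  | nil => intro h; exact absurd rfl h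
  | cons r R ih =>
    intro _
    rw [List.flatMap_cons, PySem.Set.update_append]
    rcases eq_or_ne R [] with h0 | h0
    · subst h0; rfl
    · rw [ih _ h0, set_abs m _ (fun x hx => (PySem.Set.mem_update _ _ _).mpr (Or.inr hx))]


theorem ofList_filter (p : String → Bool) (l : List String) :
    PySem.Set.ofList (l.filter p) = (PySem.Set.ofList l).filter p := by
  induction l using List.reverseRecOn with
  | nil => rfl
  | append_singleton l x ih =>
    by_cases hx : p x
    · have h1 : (l ++ [x]).filter p = l.filter p ++ [x] := by simp [List.filter_append, hx]
      rw [h1, PySem.Set.ofList_append_singleton, PySem.Set.ofList_append_singleton, ih,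
          PySem.Set.add_eq_ite, PySem.Set.add_eq_ite]
      by_cases hmem : x ∈ PySem.Set.ofList l
      · rw [if_pos hmem, if_pos (List.mem_filter.mpr ⟨hmem, hx⟩)]
      · rw [if_neg hmem, if_neg (fun hc => hmem (List.mem_filter.mp hc).1)]
        simp [List.filter_append, hx]
    · have h1 : (l ++ [x]).filter p = l.filter p := by simp [List.filter_append, hx]
      rw [h1, PySem.Set.ofList_append_singleton, ih, PySem.Set.add_eq_ite]
      by_cases hmem : x ∈ PySem.Set.ofList l
      · rw [if_pos hmem]
      · rw [if_neg hmem]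
        simp [List.filter_append, hx]

theorem count_filter_len (l : List String) (a : String) :
    (l.filter (fun c => decide (c = a))).length = l.count a := by
  rw [List.count_eq_length_filter]
  congr 1

theorem projA_append (u v : List (String × String × Int)) (a : String) :
    projA (u ++ v) a = projA u a ++ projA v a := by
  simp [projA, List.filter_append]

theorem sumFor_append (u v : List (String × Int)) (b : String) :
    sumFor (u ++ v) b = sumFor u b + sumFor v b := by
  simp [sumFor, List.filter_append]

theorem sumFor_rep {α : Type} (R : List α) (m : List (String × Int)) (b : String) :
    sumFor (R.flatMap (fun _ => m)) b = (R.length : Int) * sumFor m b := by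
  induction R with
  | nil => simp [sumFor]
  | cons r R ih =>
    rw [List.flatMap_cons, sumFor_append, ih, List.length_cons]
    push_cast
    ring

theorem nodup_filter_single (l : List String) (hl : l.Nodup) (b : String) :
    l.filter (fun c => decide (c = b)) = if b ∈ l then [b] else [] := by
  induction l with
  | nil => simp
  | cons y l ih =>
    have hnd := List.nodup_cons.mp hl
    by_cases hy : y = b
    · subst hy
      have h0 : l.filter (fun c => decide (c = y)) = [] :=
        List.filter_eq_nil_iff.mpr (fun c hc => by
          simp only [decide_eq_true_eq]
          rintro rfl
          exact hnd.1 hc)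
      simp [h0]
    · have h1 : (decide (y = b)) = false := by simp [hy]
      rw [List.filter_cons, h1, if_neg (by simp), ih hnd.2]
      have h2 : (b ∈ y :: l) ↔ (b ∈ l) := by simp [Ne.symm hy]
      by_cases hb : b ∈ l
      · rw [if_pos hb, if_pos (h2.mpr hb)]
      · rw [if_neg hb, if_neg (fun hc => hb (h2.mp hc))]

theorem projA_flat (l : List String) (g : String → List (String × Int)) (a : String) :
    projA (l.flatMap (fun s => (g s).map (fun w => (s, w.1, w.2)))) a
      = (l.filter (fun s => decide (s = a))).flatMap (fun _ => g a) := by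
  induction l with
  | nil => simp [projA]
  | cons s l ih =>
    rw [List.flatMap_cons, projA_append, ih, List.filter_cons]
    by_cases hs : s = a
    · subst hs
      have hblock : projA ((g s).map (fun w => (s, w.1, w.2))) s = g s := by
        simp [projA, List.filter_map, Function.comp, List.map_map]
      simp [hblock]
    · have hblock : projA ((g s).map (fun w => (s, w.1, w.2))) a = [] := by
        simp [projA, List.filter_map, Function.comp, hs]
      simp [hblock, hs]

theorem projA_qsA (songs : List String) (a : String) :
    projA (qsA songs) a = (songs.filter (fun s => decide (s = a))).flatMap
      (fun _ => (songs.filter (fun b => decide (a ≠ b))).map (fun b => (b, (1 : Int)))) := by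
  have h : qsA songs = songs.flatMap (fun s =>
      (((songs.filter (fun b => decide (s ≠ b))).map (fun b => (b, (1 : Int)))).map
        (fun w => (s, w.1, w.2)))) := by
    unfold qsA
    simp [List.map_map, Function.comp_def]
  rw [h, projA_flat]

theorem projA_qsB (songs : List String) (a : String) :
    projA (qsB songs) a = ((PySem.Set.ofList songs).filter (fun s => decide (s = a))).flatMap
      (fun _ => ((PySem.Set.ofList songs).filter (fun b => decide (a ≠ b))).map
        (fun b => (b, (songs.count a : Int) * (songs.count b : Int)))) := by
  have h : qsB songs = (PySem.Set.ofList songs).flatMap (fun s =>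
      ((((PySem.Set.ofList songs).filter (fun b => decide (s ≠ b))).map
        (fun b => (b, (songs.count s : Int) * (songs.count b : Int)))).map
        (fun w => (s, w.1, w.2)))) := by
    unfold qsB
    simp [List.map_map, Function.comp_def]
  rw [h, projA_flat]

theorem sum_ga (songs : List String) (a b : String) :
    sumFor ((songs.filter (fun c => decide (a ≠ c))).map (fun c => (c, (1 : Int)))) b
      = if b = a then 0 else (songs.count b : Int) := by
  unfold sumFor
  rw [List.filter_map, List.map_map]
  have hcomp : ((fun w : String × Int => decide (w.1 = b)) ∘ (fun c => (c, (1 : Int))))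
      = fun c => decide (c = b) := by funext c; rfl
  rw [hcomp, List.filter_filter]
  by_cases hb : b = a
  · subst hb
    rw [if_pos rfl]
    simp only [decide_not]
    have h0 : songs.filter (fun c => decide (c = b) && !decide (b = c)) = [] :=
      List.filter_eq_nil_iff.mpr (fun c _ => by by_cases hc : c = b <;> simp [hc])
    rw [h0]
    simp
  · rw [if_neg hb]
    simp only [decide_not]
    have h1 : songs.filter (fun c => decide (c = b) && !decide (a = c))
        = songs.filter (fun c => decide (c = b)) := by
      apply List.filter_congr
      intro c _
      by_cases hc : c = b
      · subst hc
        simp [Ne.symm hb]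
      · simp [hc]
    rw [h1]
    have h2 : List.map ((fun x : String × Int => x.2) ∘ fun c => (c, (1 : Int)))
        (songs.filter (fun c => decide (c = b)))
        = List.map (fun _ => (1 : Int)) (songs.filter (fun c => decide (c = b))) :=
      List.map_congr_left (fun c _ => rfl)
    rw [h2, PySem.List.sum_map_const_int, count_filter_len]
    ring

theorem sum_gb (songs : List String) (a b : String) :
    sumFor (((PySem.Set.ofList songs).filter (fun c => decide (a ≠ c))).map
        (fun c => (c, (songs.count a : Int) * (songs.count c : Int)))) b
      = if b = a then 0 else (songs.count a : Int) * (songs.count b : Int) := by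
  unfold sumFor
  rw [List.filter_map, List.map_map]
  have hcomp : ((fun w : String × Int => decide (w.1 = b)) ∘
      (fun c => (c, (songs.count a : Int) * (songs.count c : Int)))) = fun c => decide (c = b) := by
    funext c; rfl
  rw [hcomp, nodup_filter_single _ ((PySem.Set.nodup_ofList songs).filter _) b]
  by_cases hb : b = a
  · subst hb
    rw [if_pos rfl]
    have h0 : b ∉ (PySem.Set.ofList songs).filter (fun c => decide (b ≠ c)) := fun hc => by
      have hm := (List.mem_filter.mp hc).2
      simp at hm
    rw [if_neg h0]
    simp
  · rw [if_neg hb]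
    by_cases hbs : b ∈ songs
    · have h0 : b ∈ (PySem.Set.ofList songs).filter (fun c => decide (a ≠ c)) :=
        List.mem_filter.mpr ⟨(PySem.Set.mem_ofList _ _).mpr hbs, by simp [Ne.symm hb]⟩
      rw [if_pos h0]
      simp
    · have h0 : b ∉ (PySem.Set.ofList songs).filter (fun c => decide (a ≠ c)) := fun hc =>
        hbs ((PySem.Set.mem_ofList _ _).mp (List.mem_filter.mp hc).1)
      rw [if_neg h0]
      have hc0 : songs.count b = 0 := List.count_eq_zero.mpr hbs
      simp [hc0]

theorem main_user (songs : List String) (coo : PySem.Dict String (PySem.Dict String Int)) (h : GoodCoo coo) :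
    applyB coo (qsA songs) = applyB coo (qsB songs) := by
  by_cases hsame : ∀ x ∈ songs, ∀ y ∈ songs, x = y
  · have hA : qsA songs = [] := by
      unfold qsA
      refine List.flatMap_eq_nil_iff.mpr (fun s1 h1 => ?_)
      have h0 : songs.filter (fun s2 => decide (s1 ≠ s2)) = [] :=
        List.filter_eq_nil_iff.mpr (fun b hb => by simp [hsame s1 h1 b hb])
      rw [h0]
      rfl
    have hB : qsB songs = [] := by
      unfold qsB
      refine List.flatMap_eq_nil_iff.mpr (fun a ha => ?_)
      have h0 : (PySem.Set.ofList songs).filter (fun b => decide (a ≠ b)) = [] :=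
        List.filter_eq_nil_iff.mpr (fun b hb => by
          simp [hsame a ((PySem.Set.mem_ofList _ _).mp ha) b ((PySem.Set.mem_ofList _ _).mp hb)])
      rw [h0]
      rfl
    rw [hA, hB]
  · push Not at hsame
    obtain ⟨x, hx, y, hy, hxy⟩ := hsame
    have hne1 : ∀ a : String, songs.filter (fun b => decide (a ≠ b)) ≠ [] := by
      intro a
      rcases eq_or_ne a x with rfl | hax
      · exact List.ne_nil_of_mem (List.mem_filter.mpr ⟨hy, by simp [hxy]⟩)
      · exact List.ne_nil_of_mem (List.mem_filter.mpr ⟨hx, by simp [hax]⟩)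
    apply applyB_ext coo h
    · have m1 : (qsA songs).map (·.1) = songs.flatMap (fun s1 =>
          (songs.filter (fun s2 => decide (s1 ≠ s2))).map (fun _ => s1)) := by
        unfold qsA
        simp [List.map_flatMap, List.map_map, Function.comp_def]
      have m2 : (qsB songs).map (·.1) = (PySem.Set.ofList songs).flatMap (fun a =>
          ((PySem.Set.ofList songs).filter (fun b => decide (a ≠ b))).map (fun _ => a)) := by
        unfold qsB
        simp [List.map_flatMap, List.map_map, Function.comp_def]
      have e1 : PySem.Set.update ([] : PySem.Set String) (songs.flatMap (fun s1 =>
          (songs.filter (fun s2 => decide (s1 ≠ s2))).map (fun _ => s1)))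
          = PySem.Set.update [] songs :=
        set_nel _ _ (fun a _ => ⟨by simpa using hne1 a,
          fun z hz => by rcases List.mem_map.mp hz with ⟨b, _, rfl⟩; rfl⟩) []
      have hne2 : ∀ a ∈ PySem.Set.ofList songs,
          (PySem.Set.ofList songs).filter (fun b => decide (a ≠ b)) ≠ [] := by
        intro a _
        rcases eq_or_ne a x with rfl | hax
        · exact List.ne_nil_of_mem (List.mem_filter.mpr ⟨(PySem.Set.mem_ofList _ _).mpr hy, by simp [hxy]⟩)
        · exact List.ne_nil_of_mem (List.mem_filter.mpr ⟨(PySem.Set.mem_ofList _ _).mpr hx, by simp [hax]⟩)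
      have e2 : PySem.Set.update ([] : PySem.Set String) ((PySem.Set.ofList songs).flatMap (fun a =>
          ((PySem.Set.ofList songs).filter (fun b => decide (a ≠ b))).map (fun _ => a)))
          = PySem.Set.update [] (PySem.Set.ofList songs) :=
        set_nel _ _ (fun a ha => ⟨by simpa using hne2 a ha,
          fun z hz => by rcases List.mem_map.mp hz with ⟨b, _, rfl⟩; rfl⟩) []
      rw [m1, m2, ← PySem.Set.update_nil_left, ← PySem.Set.update_nil_left, e1, e2,
          PySem.Set.update_nil_left, PySem.Set.update_nil_left, PySem.Set.ofList_ofList]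
    · intro a
      rw [projA_qsA, projA_qsB]
      by_cases haS : a ∈ songs
      · have hRA : songs.filter (fun s => decide (s = a)) ≠ [] :=
          List.ne_nil_of_mem (List.mem_filter.mpr ⟨haS, by simp⟩)
        have hRB : (PySem.Set.ofList songs).filter (fun s => decide (s = a)) ≠ [] :=
          List.ne_nil_of_mem (List.mem_filter.mpr ⟨(PySem.Set.mem_ofList _ _).mpr haS, by simp⟩)
        apply applyInner_ext _ (h.2 a)
        · rw [List.map_flatMap, List.map_flatMap,
              ← PySem.Set.update_nil_left, ← PySem.Set.update_nil_left,
              set_rep _ _ hRA, set_rep _ _ hRB,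
              PySem.Set.update_nil_left, PySem.Set.update_nil_left]
          have g1 : ((songs.filter (fun b => decide (a ≠ b))).map (fun b => (b, (1 : Int)))).map (·.1)
              = songs.filter (fun b => decide (a ≠ b)) := by
            simp [List.map_map, Function.comp_def]
          have g2 : (((PySem.Set.ofList songs).filter (fun b => decide (a ≠ b))).map
              (fun b => (b, (songs.count a : Int) * (songs.count b : Int)))).map (·.1)
              = (PySem.Set.ofList songs).filter (fun b => decide (a ≠ b)) := by
            simp [List.map_map, Function.comp_def]
          rw [g1, g2, ofList_filter, ofList_filter, PySem.Set.ofList_ofList]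
        · intro b
          rw [sumFor_rep, sumFor_rep, sum_ga, sum_gb]
          have lA : ((songs.filter (fun s => decide (s = a))).length : Int)
              = (songs.count a : Int) := by
            rw [count_filter_len]
          have lB : (((PySem.Set.ofList songs).filter (fun s => decide (s = a))).length : Int)
              = 1 := by
            rw [nodup_filter_single _ (PySem.Set.nodup_ofList songs) a,
                if_pos ((PySem.Set.mem_ofList _ _).mpr haS)]
            rfl
          rw [lA, lB]
          by_cases hb : b = a
          · rw [if_pos hb, if_pos hb]
            ring
          · rw [if_neg hb, if_neg hb]
            ring
      · have r1 : songs.filter (fun s => decide (s = a)) = [] :=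
          List.filter_eq_nil_iff.mpr (fun s hs => by
            simp only [decide_eq_true_eq]
            rintro rfl
            exact haS hs)
        have r2 : (PySem.Set.ofList songs).filter (fun s => decide (s = a)) = [] :=
          List.filter_eq_nil_iff.mpr (fun s hs => by
            simp only [decide_eq_true_eq]
            rintro rfl
            exact haS ((PySem.Set.mem_ofList _ _).mp hs))
        rw [r1, r2]
        rfl


-- ===== A's whole fold as a replay of the concatenated per-user streams =====

theorem main_fold_A (interactions : List (String × List String)) (coo : PySem.Dict String (PySem.Dict String Int))
    (h : GoodCoo coo) :
    interactions.foldl (fun coo p =>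
        p.2.foldl (fun coo s1 =>
          p.2.foldl (fun coo s2 => if s1 ≠ s2 then gscBump coo s1 s2 1 else coo) coo) coo) coo
    = applyB coo (interactions.flatMap (fun p => qsB p.2)) := by
  induction interactions generalizing coo with
  | nil => rfl
  | cons p l ih =>
    rw [List.foldl_cons, List.flatMap_cons, applyB_append, outerA_eq, main_user p.2 coo h]
    exact ih _ (applyB_good (qsB p.2) coo h)


-- ===== B's stage-1 fold as the same stream replayed on the flat dict =====

theorem main_fold_B (interactions : List (String × List String)) (F : PySem.Dict (String × String) Int) :
    interactions.foldl (fun pc p =>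
        (PySem.Dict.counter p.2).items.foldl (fun pc q1 =>
          (PySem.Dict.counter p.2).items.foldl (fun pc q2 =>
            if q1.1 ≠ q2.1 then
              pc.insert (q1.1, q2.1) (pc.getD (q1.1, q2.1) 0 + q1.2 * q2.2)
            else pc) pc) pc) F
    = flatApply F (interactions.flatMap (fun p => qsB p.2)) := by
  induction interactions generalizing F with
  | nil => rfl
  | cons p l ih =>
    rw [List.foldl_cons, List.flatMap_cons, flatApply_append, outerB_eq]
    exact ih _


-- ===== B's stage 2 (regroup) undoes the flattening =====

theorem regroupL_append (ts : List ((String × String) × Int)) (e : (String × String) × Int) :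
    regroupL (ts ++ [e]) = rgAssign (regroupL ts) e.1.1 e.1.2 e.2 := by
  simp [regroupL, List.foldl_append]

-- inner-key membership after a regroup fold characterises the flat pairs seen so far
theorem regroup_inner_mem (ts : List ((String × String) × Int)) (a b : String)
    (hb : b ∈ ((regroupL ts).getD a PySem.Dict.empty).keys) :
    (a, b) ∈ ts.map (·.1) := by
  induction ts using List.reverseRecOn with
  | nil =>
    simp [regroupL, PySem.Dict.getD_empty, PySem.Dict.keys_empty] at hb
  | append_singleton us p ih =>
    rw [regroupL_append] at hb
    by_cases hx : p.1.1 = a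
    · rw [rgAssign, hx, PySem.Dict.getD_insert_self] at hb
      rcases (PySem.Dict.mem_keys_insert _ _ _ _).mp hb with h | h
      · subst h
        simp [← hx]
      · have := ih h
        simpa using Or.inl (by simpa using this)
    · rw [rgAssign, PySem.Dict.getD_insert_of_ne _ _ _ (fun hc => hx hc.symm)] at hb
      have := ih hb
      simpa using Or.inl (by simpa using this)

theorem regroup_mem (ts : List ((String × String) × Int)) (a b : String) (w : Int)
    (hmem : ((a, b), w) ∈ ts) :
    a ∈ (regroupL ts).keys ∧ b ∈ ((regroupL ts).getD a PySem.Dict.empty).keys := by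
  induction ts using List.reverseRecOn with
  | nil => simp at hmem
  | append_singleton us p ih =>
    rw [regroupL_append]
    rcases List.mem_append.mp hmem with h | h
    · obtain ⟨h1, h2⟩ := ih h
      constructor
      · exact (PySem.Dict.mem_keys_insert _ _ _ _).mpr (Or.inr h1)
      · by_cases hx : p.1.1 = a
        · rw [rgAssign, hx, PySem.Dict.getD_insert_self]
          exact (PySem.Dict.mem_keys_insert _ _ _ _).mpr (Or.inr h2)
        · rw [rgAssign, PySem.Dict.getD_insert_of_ne _ _ _ (fun hc => hx hc.symm)]
          exact h2
    · have hp : p = ((a, b), w) := (by simpa using h : ((a, b), w) = p).symm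
      subst hp
      constructor
      · exact (PySem.Dict.mem_keys_insert _ _ _ _).mpr (Or.inl rfl)
      · rw [rgAssign, PySem.Dict.getD_insert_self]
        exact (PySem.Dict.mem_keys_insert _ _ _ _).mpr (Or.inl rfl)

-- inserting at an existing key commutes (as dicts) with any insert at another key
theorem insert_comm_of_contains {κ ν : Type} [BEq κ] [LawfulBEq κ]
    (d : PySem.Dict κ ν) (k1 k2 : κ) (v1 v2 : ν)
    (h : d.contains k1 = true) (hne : k1 ≠ k2) :
    (d.insert k1 v1).insert k2 v2 = (d.insert k2 v2).insert k1 v1 := by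
  apply PySem.Dict.ext
  have hb12 : (k2 == k1) = false := by simp [Ne.symm hne]
  have hb21 : (k1 == k2) = false := by simp [hne]
  by_cases h2 : d.contains k2 = true
  · have hc1 : (d.insert k1 v1).contains k2 = true := by
      rw [PySem.Dict.contains_insert, h2]; simp
    have hc2 : (d.insert k2 v2).contains k1 = true := by
      rw [PySem.Dict.contains_insert, h]; simp
    rw [PySem.Dict.items_insert_of_contains _ _ hc1,
        PySem.Dict.items_insert_of_contains _ _ hc2,
        PySem.Dict.items_insert_of_contains _ _ h,
        PySem.Dict.items_insert_of_contains _ _ h2,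
        List.map_map, List.map_map]
    apply List.map_congr_left
    intro p _
    by_cases hp1 : p.1 == k1
    · have hpe : p.1 = k1 := by simpa using hp1
      have hp2 : (p.1 == k2) = false := by simp [hpe, hne]
      simp only [Function.comp, hp1, hp2, hb21, Bool.false_eq_true, if_true, if_false]
    · by_cases hp2 : p.1 == k2
      · simp [Function.comp, hp1, hp2, hb12]
      · simp [Function.comp, hp1, hp2]
  · have h2f : d.contains k2 = false := by simpa using h2
    have hc1 : (d.insert k1 v1).contains k2 = false := by
      rw [PySem.Dict.contains_insert, h2f, hb12]; rfl
    have hc2 : (d.insert k2 v2).contains k1 = true := by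
      rw [PySem.Dict.contains_insert, h]; simp
    rw [PySem.Dict.items_insert_of_not_contains _ _ hc1,
        PySem.Dict.items_insert_of_contains _ _ hc2,
        PySem.Dict.items_insert_of_contains _ _ h,
        PySem.Dict.items_insert_of_not_contains _ _ h2f,
        List.map_append]
    congr 1
    simp [hb12]

-- rgAssign at another pair commutes with gscBump at an already-present pair
theorem assign_bump_comm (coo : PySem.Dict String (PySem.Dict String Int)) (a b x y : String)
    (k v : Int) (ha : a ∈ coo.keys) (hb : b ∈ (coo.getD a PySem.Dict.empty).keys)
    (hne : ¬(x = a ∧ y = b)) :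
    rgAssign (gscBump coo a b k) x y v = gscBump (rgAssign coo x y v) a b k := by
  by_cases hx : x = a
  · subst hx
    have hyb : y ≠ b := fun hc => hne ⟨rfl, hc⟩
    have hbne : b ≠ y := Ne.symm hyb
    simp only [rgAssign, gscBump, PySem.Dict.getD_insert_self,
      PySem.Dict.insert_insert_self]
    rw [PySem.Dict.getD_insert_of_ne _ _ _ hbne]
    congr 1
    have hcon : ((coo.getD x PySem.Dict.empty).contains b) = true :=
      (PySem.Dict.contains_iff_mem_keys _ _).mpr hb
    exact insert_comm_of_contains _ b y _ _ hcon hbne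
  · have hax : a ≠ x := Ne.symm hx
    have hxa : x ≠ a := hx
    simp only [rgAssign, gscBump]
    rw [PySem.Dict.getD_insert_of_ne _ _ _ hxa,
        PySem.Dict.getD_insert_of_ne _ _ _ hax]
    have hcon : coo.contains a = true := (PySem.Dict.contains_iff_mem_keys _ _).mpr ha
    exact insert_comm_of_contains _ a x _ _ hcon hax

-- replaying the regroup fold over an items list with the value at pair (a,b) bumped by k
theorem regroup_replace (a b : String) (w k : Int) :
    ∀ (ts : List ((String × String) × Int)), (ts.map (·.1)).Nodup → ((a, b), w) ∈ ts →
    regroupL (ts.map (fun p => if p.1 == (a, b) then ((a, b), w + k) else p))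
      = gscBump (regroupL ts) a b k := by
  intro ts
  induction ts using List.reverseRecOn with
  | nil => intro _ h; simp at h
  | append_singleton us p ih =>
    intro hnd hmem
    have hnd' : (us.map (·.1)).Nodup ∧ p.1 ∉ us.map (·.1) := by
      rw [List.map_append] at hnd
      refine ⟨(List.nodup_append.mp hnd).1, fun hc => ?_⟩
      exact (List.nodup_append.mp hnd).2.2 p.1 hc p.1 (List.mem_map.mpr ⟨p, List.mem_cons_self, rfl⟩) rfl
    by_cases hp : p.1 = (a, b)
    · -- the replaced element is the last one; the prefix is untouched
      have hmem' : p = ((a, b), w) := by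
        rcases List.mem_append.mp hmem with h | h
        · exfalso
          have hmm : (a, b) ∈ us.map (·.1) := List.mem_map.mpr ⟨_, h, rfl⟩
          rw [← hp] at hmm
          exact hnd'.2 hmm
        · exact (by simpa using h : ((a, b), w) = p).symm
      subst hmem'
      have hmap : us.map (fun p => if p.1 == (a, b) then ((a, b), w + k) else p) = us := by
        have hpt : ∀ q ∈ us, (fun p => if p.1 == (a, b) then ((a, b), w + k) else p) q = q := by
          intro q hq
          have hqne : q.1 ≠ (a, b) := by
            intro hc
            have : (a, b) ∈ us.map (·.1) := by
              rw [← hc]; exact List.mem_map.mpr ⟨_, hq, rfl⟩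
            exact hnd'.2 this
          simp [hqne]
        calc us.map (fun p => if p.1 == (a, b) then ((a, b), w + k) else p)
            = us.map id := List.map_congr_left hpt
          _ = us := List.map_id us
      have hlast : ([((a, b), w)] : List ((String × String) × Int)).map
          (fun p => if p.1 == (a, b) then ((a, b), w + k) else p) = [((a, b), w + k)] := by simp
      rw [List.map_append, hmap, hlast, regroupL_append, regroupL_append]
      simp [rgAssign, gscBump, PySem.Dict.getD_insert_self, PySem.Dict.insert_insert_self]
    · have hmem' : ((a, b), w) ∈ us := by
        rcases List.mem_append.mp hmem with h | h
        · exact h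
        · exfalso
          have := (by simpa using h : ((a, b), w) = p)
          exact hp (congrArg Prod.fst this).symm
      have hpid : [p].map (fun p => if p.1 == (a, b) then ((a, b), w + k) else p) = [p] := by
        simp [hp]
      rw [List.map_append, hpid, regroupL_append, regroupL_append, ih hnd'.1 hmem']
      obtain ⟨hka, hkb⟩ := regroup_mem us a b w hmem'
      have hnepair : ¬(p.1.1 = a ∧ p.1.2 = b) := by
        intro hq
        exact hp (Prod.ext hq.1 hq.2)
      exact assign_bump_comm (regroupL us) a b p.1.1 p.1.2 k p.2 hka hkb hnepair

-- one flat update followed by regrouping = regrouping followed by one nested bump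
theorem regroup_step (F : PySem.Dict (String × String) Int) (a b : String) (k : Int)
    (hnd : F.keys.Nodup) :
    regroupL ((F.insert (a, b) (F.getD (a, b) 0 + k)).items)
      = gscBump (regroupL F.items) a b k := by
  by_cases hc : F.contains (a, b) = true
  · obtain ⟨w, hw⟩ : ∃ w, F.get? (a, b) = some w := by
      have := PySem.Dict.contains_eq_isSome_get? (d := F) (k := (a, b))
      rw [hc] at this
      exact Option.isSome_iff_exists.mp this.symm
    have hgd : F.getD (a, b) 0 = w := PySem.Dict.getD_of_get?_eq_some _ _ hw
    have hmem : ((a, b), w) ∈ F.items := PySem.Dict.mem_items_of_get?_eq_some _ hw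
    rw [PySem.Dict.items_insert_of_contains _ _ hc, hgd]
    have hnd' : (F.items.map (·.1)).Nodup := hnd
    have := regroup_replace a b w k F.items hnd' hmem
    simpa using this
  · have hcf : F.contains (a, b) = false := by simpa using hc
    have hgd : F.getD (a, b) 0 = 0 := PySem.Dict.getD_of_not_contains _ _ hcf
    rw [PySem.Dict.items_insert_of_not_contains _ _ hcf, hgd, regroupL_append]
    have hnotin : b ∉ ((regroupL F.items).getD a PySem.Dict.empty).keys := by
      intro hb
      have := regroup_inner_mem F.items a b hb
      have : F.contains (a, b) = true := by
        rw [PySem.Dict.contains_eq_decide_mem_keys]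
        simpa [PySem.Dict.keys] using this
      rw [this] at hcf
      exact absurd hcf (by simp)
    have hicf : ((regroupL F.items).getD a PySem.Dict.empty).contains b = false := by
      rcases h' : ((regroupL F.items).getD a PySem.Dict.empty).contains b with _ | _
      · rfl
      · exact absurd ((PySem.Dict.contains_iff_mem_keys _ _).mp h') hnotin
    have higd : ((regroupL F.items).getD a PySem.Dict.empty).getD b 0 = 0 :=
      PySem.Dict.getD_of_not_contains _ _ hicf
    simp [rgAssign, gscBump, higd]

-- regrouping the whole flat dict built from a stream = replaying the stream on the nested dict
theorem regroup_main (qs : List (String × String × Int)) :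
    ∀ (F : PySem.Dict (String × String) Int), F.keys.Nodup →
    regroupL (flatApply F qs).items = applyB (regroupL F.items) qs := by
  induction qs with
  | nil => intro F _; rfl
  | cons t qs ih =>
    intro F hnd
    have hstep : flatApply F (t :: qs)
        = flatApply (F.insert (t.1, t.2.1) (F.getD (t.1, t.2.1) 0 + t.2.2)) qs := rfl
    rw [hstep, ih _ (PySem.Dict.nodup_keys_insert _ _ _ hnd),
        regroup_step F t.1 t.2.1 t.2.2 hnd]
    rfl


-- ===== VERDICT (by name: the statement is the Claim_ definition above) =====
theorem generate_song_cooccurrences_spec : Claim_equal_generate_song_cooccurrences := by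
  intro interactions _
  unfold Spec_generate_song_cooccurrences generate_song_cooccurrences generate_song_cooccurrences_alt
  have hgood : GoodCoo PySem.Dict.empty := by
    constructor
    · simp [PySem.Dict.keys_empty]
    · intro a
      simp [PySem.Dict.getD_empty, PySem.Dict.keys_empty]
  rw [main_fold_A interactions PySem.Dict.empty hgood, main_fold_B]
  have h2 := regroup_main (interactions.flatMap (fun p => qsB p.2)) PySem.Dict.empty
    (by simp [PySem.Dict.keys_empty])
  have h3 : regroupL (PySem.Dict.empty : PySem.Dict (String × String) Int).items
      = (PySem.Dict.empty : PySem.Dict String (PySem.Dict String Int)) := rfl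
  rw [h3] at h2
  simp only [regroupL, rgAssign] at h2
  rw [← h2]
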